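-- pv_equiv track=rewrite | github.com/865699871/IAGS | simulations/NonCRBs/NonCRBSimulateion.py | sequence2adjacency
-- ===== SOURCE A (Python) =====
-- def sequence2adjacency(sequence):
--     adjacency = []
--     for i in sequence:
--         block = i[0]
--         if block.startswith('-'):
--             adjacency.append(['$',block[1:] + 'b'])
--             start = block[1:] + 'a'
--         else:
--             adjacency.append(['$', block + 'a'])
--             start = block + 'b'
--         for j in range(len(i)-1):
--             block = i[j+1]
--             if block.startswith('-'):
--                 adjacency.append([start, block[1:] + 'b'])
--                 start = block[1:] + 'a'
--             else:
--                 adjacency.append([start, block + 'a'])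
--                 start = block + 'b'
--         adjacency.append([start,'$'])
--     return adjacency
-- ===== SOURCE B (Python) =====
-- def sequence2adjacency(sequence):
--     adjacency = []
--     for i in sequence:
--         ext = ['$']
--         for b in i:
--             if b.startswith('-'):
--                 ext += [b[1:] + 'b', b[1:] + 'a']
--             else:
--                 ext += [b + 'a', b + 'b']
--         ext.append('$')
--         it = iter(ext)
--         adjacency += [[x, y] for x, y in zip(it, it)]
--     return adjacency
-- ===== Notes on version B (the rewrite author's own statement) =====
-- stated objective: alternative
-- what changed: B first materialises a flat extremities list ['$'] + two endpoints per block + ['$'] and then pairs consecutive entries two at a time, instead of threading a 'start' accumulator with a special-cased first block.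
-- crash fix: On inputs containing an empty inner element A raises IndexError (it reads i[0]); B returns the adjacency ['$','$'] for that element. — e.g. on sequence2adjacency([[]]): A raises IndexError, B returns [["$", "$"]]
import Mathlib
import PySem

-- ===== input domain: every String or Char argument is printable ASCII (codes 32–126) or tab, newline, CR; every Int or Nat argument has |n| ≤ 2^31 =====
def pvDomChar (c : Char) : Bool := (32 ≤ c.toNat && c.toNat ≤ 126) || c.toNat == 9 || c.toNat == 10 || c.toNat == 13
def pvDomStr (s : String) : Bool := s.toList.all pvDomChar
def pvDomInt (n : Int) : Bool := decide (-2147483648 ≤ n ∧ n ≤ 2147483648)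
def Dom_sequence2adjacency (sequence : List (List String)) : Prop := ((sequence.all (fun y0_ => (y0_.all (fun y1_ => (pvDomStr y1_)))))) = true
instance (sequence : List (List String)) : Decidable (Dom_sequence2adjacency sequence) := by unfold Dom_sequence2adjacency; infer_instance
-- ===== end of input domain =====

-- B builds a flat extremities list per element and pairs it up two at a time (alternative
-- decomposition, same cost); where A raises IndexError on an empty inner element, B returns
-- ['$','$'] for it (see Raises_ block). Equivalence is about the return value only.

-- ===== PORT A =====
-- A's per-block branch, used verbatim inside both of A's loops
def pvStepA (p : List (List String) × String) (block : String) : List (List String) × String :=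
  if PySem.Str.startswith block "-" then
    (p.1 ++ [[p.2, PySem.Str.slice block (some 1) none ++ "b"]], PySem.Str.slice block (some 1) none ++ "a")
  else
    (p.1 ++ [[p.2, block ++ "a"]], block ++ "b")

def sequence2adjacency (sequence : List (List String)) : List (List String) :=
  sequence.foldl (fun adjacency i =>
    let block := PySem.List.pyGetD i 0 ""   -- i[0]; Pre_ excludes empty i, where Python raises IndexError
    let st :=
      if PySem.Str.startswith block "-" then
        (adjacency ++ [["$", PySem.Str.slice block (some 1) none ++ "b"]], PySem.Str.slice block (some 1) none ++ "a")
      else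
        (adjacency ++ [["$", block ++ "a"]], block ++ "b")
    let st :=
      (PySem.List.pyRange 0 ((i.length : Int) - 1) 1).foldl
        (fun p j => pvStepA p (PySem.List.pyGetD i (j + 1) "")) st
    st.1 ++ [[st.2, "$"]]) []

-- ===== PORT B =====
def pvEndpoints (b : String) : List String :=
  if PySem.Str.startswith b "-" then
    [PySem.Str.slice b (some 1) none ++ "b", PySem.Str.slice b (some 1) none ++ "a"]
  else
    [b ++ "a", b ++ "b"]

def pvPairUp : List String → List (List String)
  | x :: y :: rest => [x, y] :: pvPairUp rest
  | _ => []

def sequence2adjacency_alt (sequence : List (List String)) : List (List String) :=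
  sequence.foldl (fun adjacency i =>
    let ext := (i.foldl (fun e b => e ++ pvEndpoints b) ["$"]) ++ ["$"]
    adjacency ++ pvPairUp ext) []

-- ===== PRECONDITION & SPEC =====
-- Pre_ excludes inputs with an empty inner element, on which A raises IndexError (i[0]).
def Pre_sequence2adjacency (sequence : List (List String)) : Prop :=
  ∀ i ∈ sequence, i ≠ []
instance (sequence : List (List String)) : Decidable (Pre_sequence2adjacency sequence) := by
  unfold Pre_sequence2adjacency; infer_instance
def pvWitness_sequence2adjacency : List (List String) := [["1", "-2"], ["-3"]]

-- On inputs containing an empty inner element A raises IndexError (it reads i[0]); B returns the adjacency ['$','$'] for that element.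
def Raises_sequence2adjacency (sequence : List (List String)) : Prop :=
  ∃ i ∈ sequence, i = []
instance (sequence : List (List String)) : Decidable (Raises_sequence2adjacency sequence) := by
  unfold Raises_sequence2adjacency; infer_instance
def pvRaiseWitness_sequence2adjacency : List (List String) := [[]]
def pvRaiseWitnessOut_sequence2adjacency : List (List String) := [["$", "$"]]

def Spec_sequence2adjacency (sequence : List (List String)) (out : List (List String)) : Prop := out = sequence2adjacency_alt sequence
instance (sequence : List (List String)) (out : List (List String)) : Decidable (Spec_sequence2adjacency sequence out) := by unfold Spec_sequence2adjacency; infer_instance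

-- ===== CLAIM (what is proved, stated in full; the proofs are below) =====
def Claim_equal_sequence2adjacency : Prop := ∀ (sequence : List (List String)), Dom_sequence2adjacency sequence → Pre_sequence2adjacency sequence → Spec_sequence2adjacency sequence (sequence2adjacency sequence)
def Claim_raises_sequence2adjacency : Prop := (∀ (sequence : List (List String)), Dom_sequence2adjacency sequence → Raises_sequence2adjacency sequence → ¬ Pre_sequence2adjacency sequence) ∧ (Dom_sequence2adjacency (pvRaiseWitness_sequence2adjacency) ∧ Raises_sequence2adjacency (pvRaiseWitness_sequence2adjacency) ∧ sequence2adjacency_alt (pvRaiseWitness_sequence2adjacency) = pvRaiseWitnessOut_sequence2adjacency)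

-- ===== LEMMAS AND PROOFS =====

-- pvStepA in terms of pvEndpoints: it emits [start, first endpoint] and the new start is the second.
theorem pvStepA_eq (p : List (List String) × String) (b : String) :
    pvStepA p b = (p.1 ++ [[p.2, (pvEndpoints b).headI]], (pvEndpoints b).getLastI) := by
  unfold pvStepA pvEndpoints
  split_ifs <;> rfl

-- A's inner index loop over range(len(i)-1) reading i[j+1] is a fold of pvStepA over i.tail.
theorem pvInnerLoop_eq (i : List String) (st : List (List String) × String) :
    (PySem.List.pyRange 0 ((i.length : Int) - 1) 1).foldl
        (fun p j => pvStepA p (PySem.List.pyGetD i (j + 1) "")) st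
      = (i.drop 1).foldl pvStepA st := by
  have h1 : PySem.List.pyRange 0 ((i.length : Int) - 1) 1
      = (PySem.List.pyRange 1 (i.length : Int) 1).map (fun j => j - 1) := by
    rw [PySem.List.pyRange_one, PySem.List.pyRange_one, List.map_map]
    have : ((i.length : Int) - 1 - 0).toNat = ((i.length : Int) - 1).toNat := by omega
    rw [this]
    apply List.map_congr_left
    intro k _
    simp only [Function.comp]
    omega
  rw [h1, List.foldl_map]
  have h2 : ∀ st, (PySem.List.pyRange 1 (i.length : Int) 1).foldl
      (fun p j => pvStepA p (PySem.List.pyGetD i (j - 1 + 1) "")) st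
      = (PySem.List.pyRange 1 (i.length : Int) 1).foldl
      (fun p j => pvStepA p (PySem.List.pyGetD i j "")) st := by
    intro st
    apply PySem.List.foldl_congr_mem
    intro p j hj
    have hj1 : j - 1 + 1 = j := by omega
    rw [hj1]
  rw [h2]
  exact PySem.List.foldl_pyRange_pyGetD' i "" pvStepA st (by norm_num)

-- the core pairing invariant: folding pvStepA and closing with '$' is pairing the extremity list
theorem pvLoop_pairs (rest : List String) : ∀ (adj : List (List String)) (start : String),
    (let st := rest.foldl pvStepA (adj, start); st.1 ++ [[st.2, "$"]])
      = adj ++ pvPairUp (start :: rest.flatMap pvEndpoints ++ ["$"]) := by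
  induction rest with
  | nil => intro adj start; simp [pvPairUp]
  | cons b rest ih =>
    intro adj start
    have hb : pvStepA (adj, start) b
        = (adj ++ [[start, (pvEndpoints b).headI]], (pvEndpoints b).getLastI) := pvStepA_eq _ _
    have hep : pvEndpoints b = [(pvEndpoints b).headI, (pvEndpoints b).getLastI] := by
      unfold pvEndpoints; split_ifs <;> rfl
    simp only [List.foldl_cons, hb]
    rw [ih]
    conv_rhs => rw [List.flatMap_cons, hep]
    simp [pvPairUp]

-- B's ext accumulation is ['$'] followed by the flatMap of endpoints
theorem pvExt_eq (i : List String) :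
    i.foldl (fun e b => e ++ pvEndpoints b) ["$"] = "$" :: i.flatMap pvEndpoints := by
  simpa using PySem.List.foldl_append_eq_flatMap pvEndpoints i ["$"]

-- per-element agreement for a nonempty element
theorem pvElem_eq (i : List String) (hne : i ≠ []) (adj : List (List String)) :
    (let block := PySem.List.pyGetD i 0 ""
     let st :=
       if PySem.Str.startswith block "-" then
         (adj ++ [["$", PySem.Str.slice block (some 1) none ++ "b"]], PySem.Str.slice block (some 1) none ++ "a")
       else
         (adj ++ [["$", block ++ "a"]], block ++ "b")
     let st :=
       (PySem.List.pyRange 0 ((i.length : Int) - 1) 1).foldl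
         (fun p j => pvStepA p (PySem.List.pyGetD i (j + 1) "")) st
     st.1 ++ [[st.2, "$"]])
      = adj ++ pvPairUp ((i.foldl (fun e b => e ++ pvEndpoints b) ["$"]) ++ ["$"]) := by
  obtain ⟨b0, rest, rfl⟩ := List.exists_cons_of_ne_nil hne
  have hget : PySem.List.pyGetD (b0 :: rest) 0 "" = b0 := by
    simp [PySem.List.pyGetD, PySem.List.pyGet?, PySem.List.pyIdx?]
  simp only [hget, pvInnerLoop_eq, List.drop_succ_cons, List.drop_zero]
  have hfirst :
      (if PySem.Str.startswith b0 "-" then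
         (adj ++ [["$", PySem.Str.slice b0 (some 1) none ++ "b"]], PySem.Str.slice b0 (some 1) none ++ "a")
       else
         (adj ++ [["$", b0 ++ "a"]], b0 ++ "b"))
      = pvStepA (adj, "$") b0 := by
    unfold pvStepA; split_ifs <;> rfl
  rw [hfirst, pvExt_eq]
  have := pvLoop_pairs (b0 :: rest) adj "$"
  simpa using this

-- ===== VERDICT (by name: the statement is the Claim_ definition above) =====
theorem sequence2adjacency_spec : Claim_equal_sequence2adjacency := by
  intro sequence hdom hpre
  unfold Spec_sequence2adjacency sequence2adjacency sequence2adjacency_alt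
  induction sequence using List.reverseRecOn with
  | nil => rfl
  | append_singleton init i ih =>
    have hdom' : Dom_sequence2adjacency init := by
      unfold Dom_sequence2adjacency at hdom ⊢
      simp only [List.all_append, Bool.and_eq_true] at hdom
      exact hdom.1
    have hpre' : Pre_sequence2adjacency init := fun j hj => hpre j (by simp [hj])
    have hne : i ≠ [] := hpre i (by simp)
    rw [List.foldl_append, List.foldl_append, ih hdom' hpre']
    simp only [List.foldl_cons, List.foldl_nil]
    exact pvElem_eq i hne _

@[simp] theorem sequence2adjacency_raises : Claim_raises_sequence2adjacency := by
  unfold Claim_raises_sequence2adjacency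
  constructor
  · intro sequence _ ⟨i, hi, hnil⟩ hpre
    exact hpre i hi hnil
  · refine ⟨by decide, ⟨[], by simp [pvRaiseWitness_sequence2adjacency]⟩, by decide⟩
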